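-- pv_equiv track=rewrite | github.com/cankaratepe23/cse2138-project-1 | main.py | handleFractionLength
-- ===== SOURCE A (Python) =====
-- def roundUp(mantissa):
--     newMantissa = ''
--     lastIndexCopied = len(mantissa)
--     for i in reversed(range(len(mantissa))):
--         lastIndexCopied = i
--         if mantissa[i] == '1':
--             newMantissa += '0'
--         elif mantissa[i] == '0':
--             newMantissa += '1'
--             break
--     return mantissa[:lastIndexCopied] + newMantissa[::-1]
--
-- def handleFractionLength(mantissa, fractionLength):
--     if fractionLength > len(mantissa):
--         while fractionLength > len(mantissa):
--             mantissa += '0'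
--         return mantissa
--
--     remainingBitsIndex = fractionLength - len(mantissa)
--     remainingBits = mantissa[remainingBitsIndex:]
--     newMantissa = mantissa[:remainingBitsIndex]
--     if remainingBits[0] == '1' and remainingBits[1:].find('1') != -1:
--         newMantissa = roundUp(newMantissa)
--     return newMantissa
-- ===== SOURCE B (Python) =====
-- def handleFractionLength(mantissa, fractionLength):
--     n = len(mantissa)
--     if fractionLength >= n:
--         return mantissa + '0' * (fractionLength - n)
--     k = max(fractionLength, 0)
--     keep, rest = mantissa[:k], mantissa[k:]
--     if rest[0] == '1' and '1' in rest[1:]: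
--         # width-preserving binary increment with wrap-around, via integer arithmetic
--         return format((int(keep, 2) + 1) % (1 << k), '0' + str(k) + 'b') if k else ''
--     return keep
-- ===== Notes on version B (the rewrite author's own statement) =====
-- stated objective: simpler
-- what changed: Replaces A's character-by-character carry-propagation loop (roundUp) with a single integer operation — int(keep,2)+1 modulo 2^k formatted back at fixed width — and the zero-padding while-loop with one '0'*(k) concatenation; B also returns the mantissa unchanged when fractionLength == len(mantissa) where A returns '' (stated as D_). Pre_ requires the kept prefix to be a binary string when 0 < fractionLength < len, the function's natural domain (there A's scan returns accidental values on other characters while B's int() parse raises).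
-- intended difference: When fractionLength equals len(mantissa) (mantissa nonempty) A returns '' because its slice mantissa[:0] drops everything, while B returns the mantissa unchanged, the intended 'keep fractionLength bits' result. — e.g. on handleFractionLength("10", 2): A returns "", B returns "10"
-- outside the precondition, e.g. on handleFractionLength('a11', 1): A returns '', B raises ValueError
import Mathlib
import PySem

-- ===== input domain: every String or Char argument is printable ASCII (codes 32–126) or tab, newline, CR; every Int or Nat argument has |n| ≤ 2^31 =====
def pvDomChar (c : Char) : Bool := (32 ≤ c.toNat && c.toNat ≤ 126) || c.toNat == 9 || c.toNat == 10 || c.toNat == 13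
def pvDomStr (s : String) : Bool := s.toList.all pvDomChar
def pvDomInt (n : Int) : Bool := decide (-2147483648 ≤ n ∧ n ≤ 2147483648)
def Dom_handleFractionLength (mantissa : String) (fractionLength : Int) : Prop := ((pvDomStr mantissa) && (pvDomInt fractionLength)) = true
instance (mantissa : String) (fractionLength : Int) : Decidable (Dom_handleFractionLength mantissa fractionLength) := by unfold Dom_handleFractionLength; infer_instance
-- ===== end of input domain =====

-- B replaces A's character-by-character carry scan (roundUp) by one integer operation —
-- parse the kept prefix with int(keep,2), add 1 modulo 2^k, format back at fixed width —
-- and A's padding while-loop by a single '0'*(k) concatenation; on fractionLength ==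
-- len(mantissa) B returns the mantissa unchanged where A returns '' (see D_ below).

-- ===== PORT A =====
-- one loop step of roundUp's 'for i in reversed(range(len(mantissa)))' (state: newMantissa,
-- lastIndexCopied, whether the break was hit)
def roundUpStep (m : List Char) (st : List Char × Nat × Bool) (i : Nat) : List Char × Nat × Bool :=
  if st.2.2 then st
  else
    let c := m.getD i ' '
    if c = '1' then (st.1 ++ ['0'], (i, false))
    else if c = '0' then (st.1 ++ ['1'], (i, true))
    else (st.1, (i, false))

def roundUpAFin (m : List Char) (st : List Char × Nat × Bool) : List Char :=
  m.take st.2.1 ++ st.1.reverse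

def roundUpA (m : List Char) : List Char :=
  roundUpAFin m (((List.range m.length).reverse).foldl (roundUpStep m) ([], (m.length, false)))

def handleFractionLength (mantissa : String) (fractionLength : Int) : String :=
  let m := mantissa.toList
  if fractionLength > (m.length : Int) then
    -- the while-loop appends '0' once per iteration, (fractionLength - len) times
    String.ofList ((List.range (fractionLength - (m.length : Int)).toNat).foldl
      (fun acc _ => acc ++ ['0']) m)
  else
    let remainingBitsIndex : Int := fractionLength - (m.length : Int)
    let remainingBits := PySem.List.slice m (some remainingBitsIndex) none
    let newMantissa := PySem.List.slice m none (some remainingBitsIndex)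
    match PySem.List.pyGet? remainingBits 0 with
    | none => ""   -- Python raises IndexError here (empty mantissa, fractionLength ≤ 0); outside Pre_
    | some c =>
      if c = '1' ∧ PySem.Chars.find (PySem.List.slice remainingBits (some 1) none) ['1'] ≠ -1 then
        String.ofList (roundUpA newMantissa)
      else String.ofList newMantissa

-- ===== PORT B =====
-- int(s, 2): exact on binary strings (Pre_ restricts the mantissa to '0'/'1' characters)
def binVal (l : List Char) : Nat := l.foldl (fun a c => 2 * a + (if c = '1' then 1 else 0)) 0

-- format(n, '0' + str(L) + 'b'): exact for n < 2^L (guaranteed here by the % 2^k)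
def binStr : Nat → Nat → List Char
  | 0, _ => []
  | L + 1, n => binStr L (n / 2) ++ [if n % 2 = 1 then '1' else '0']

def handleFractionLength_alt (mantissa : String) (fractionLength : Int) : String :=
  let m := mantissa.toList
  if fractionLength ≥ (m.length : Int) then
    String.ofList (m ++ List.replicate (fractionLength - (m.length : Int)).toNat '0')
  else
    let k : Int := max fractionLength 0
    let keep := PySem.List.slice m none (some k)
    let rest := PySem.List.slice m (some k) none
    match PySem.List.pyGet? rest 0 with
    | none => ""   -- Python B raises IndexError here (empty mantissa, fractionLength < 0); outside Pre_
    | some c =>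
      if c = '1' ∧ PySem.Chars.isIn ['1'] (PySem.List.slice rest (some 1) none) then
        if k = 0 then ""   -- 'if k else'…: width 0, int('',2) never called
        else String.ofList (binStr k.toNat ((binVal keep + 1) % 2 ^ k.toNat))
      else String.ofList keep

-- ===== PRECONDITION & SPEC =====
-- Pre_ excludes (a) the inputs where A raises IndexError (empty mantissa with fractionLength ≤ 0)
-- and (b) inputs that reach the round-up (0 < fractionLength < len and the dropped tail starts
-- with '1' and has another '1') with a kept prefix containing characters other than '0'/'1' —
-- outside the function's binary-string domain — on which A's carry scan still returns
-- accidental values while B's int() parse raises.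
def Pre_handleFractionLength (mantissa : String) (fractionLength : Int) : Prop :=
  (mantissa ≠ "" ∨ 0 < fractionLength) ∧
    (0 < fractionLength → fractionLength < (mantissa.toList.length : Int) →
      mantissa.toList.getD fractionLength.toNat ' ' = '1' →
      '1' ∈ mantissa.toList.drop (fractionLength.toNat + 1) →
      (mantissa.toList.take fractionLength.toNat).all (fun c => c == '0' || c == '1') = true)
instance (mantissa : String) (fractionLength : Int) : Decidable (Pre_handleFractionLength mantissa fractionLength) := by
  unfold Pre_handleFractionLength; infer_instance
def pvWitness_handleFractionLength : String × Int := ("10110", 3)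

-- When fractionLength equals len(mantissa) (mantissa nonempty) no bits need dropping, but A's
-- slice mantissa[:0] makes it return '' (or roundUp('') = ''); B returns the mantissa unchanged,
-- which is the intended 'keep fractionLength bits' result.
def D_handleFractionLength (mantissa : String) (fractionLength : Int) : Prop :=
  fractionLength = (mantissa.toList.length : Int) ∧ mantissa ≠ ""
instance (mantissa : String) (fractionLength : Int) : Decidable (D_handleFractionLength mantissa fractionLength) := by
  unfold D_handleFractionLength; infer_instance
def Spec_handleFractionLength (mantissa : String) (fractionLength : Int) (out : String) : Prop :=
  ¬ D_handleFractionLength mantissa fractionLength → out = handleFractionLength_alt mantissa fractionLength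
instance (mantissa : String) (fractionLength : Int) (out : String) : Decidable (Spec_handleFractionLength mantissa fractionLength out) := by
  unfold Spec_handleFractionLength; infer_instance
def pvDiffWitness_handleFractionLength : String × Int := ("10", 2)
def pvDiffWitnessOut_handleFractionLength : String × String := ("", "10")

-- ===== CLAIM (what is proved, stated in full; the proofs are below) =====
def Claim_unchanged_handleFractionLength : Prop := ∀ (mantissa : String) (fractionLength : Int), Dom_handleFractionLength mantissa fractionLength → Pre_handleFractionLength mantissa fractionLength → Spec_handleFractionLength mantissa fractionLength (handleFractionLength mantissa fractionLength)
def Claim_changed_handleFractionLength : Prop := Dom_handleFractionLength (pvDiffWitness_handleFractionLength.1) (pvDiffWitness_handleFractionLength.2) ∧ Pre_handleFractionLength (pvDiffWitness_handleFractionLength.1) (pvDiffWitness_handleFractionLength.2) ∧ D_handleFractionLength (pvDiffWitness_handleFractionLength.1) (pvDiffWitness_handleFractionLength.2) ∧ handleFractionLength (pvDiffWitness_handleFractionLength.1) (pvDiffWitness_handleFractionLength.2) = pvDiffWitnessOut_handleFractionLength.1 ∧ handleFractionLength_alt (pvDiffWitness_handleFractionLength.1) (pvDiffWitness_handleFractionLength.2)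 = pvDiffWitnessOut_handleFractionLength.2 ∧ pvDiffWitnessOut_handleFractionLength.1 ≠ pvDiffWitnessOut_handleFractionLength.2
def Claim_exact_handleFractionLength : Prop := ∀ (mantissa : String) (fractionLength : Int), Dom_handleFractionLength mantissa fractionLength → Pre_handleFractionLength mantissa fractionLength → D_handleFractionLength mantissa fractionLength → handleFractionLength mantissa fractionLength ≠ handleFractionLength_alt mantissa fractionLength

-- ===== LEMMAS AND PROOFS =====

-- the padding while-loop appends exactly k zeros
theorem padFold_eq (m : List Char) (k : Nat) :
    (List.range k).foldl (fun acc _ => acc ++ ['0']) m = m ++ List.replicate k '0' := by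
  induction k with
  | zero => simp
  | succ k ih => rw [List.range_succ, List.foldl_append, ih, List.replicate_succ']; simp

-- after the break is hit, the remaining iterations do nothing
theorem roundUpStep_broke (l : List Char) (xs : List Nat) (a : List Char) (j : Nat) :
    xs.foldl (roundUpStep l) (a, (j, true)) = (a, (j, true)) := by
  induction xs with
  | nil => rfl
  | cons x xs ih => simp [roundUpStep, ih]

-- the accumulator is only ever appended to
theorem roundUpStep_acc (l : List Char) (xs : List Nat) (a : List Char) (s : Nat × Bool) :
    xs.foldl (roundUpStep l) (a, s) =
      (a ++ (xs.foldl (roundUpStep l) ([], s)).1, (xs.foldl (roundUpStep l) ([], s)).2) := by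
  induction xs generalizing a s with
  | nil => simp
  | cons x xs ih =>
    simp only [List.foldl_cons]
    have hstep : roundUpStep l (a, s) x =
        (a ++ (roundUpStep l ([], s) x).1, (roundUpStep l ([], s) x).2) := by
      simp only [roundUpStep]
      split_ifs <;> simp
    rw [hstep, ih, ih (roundUpStep l ([], s) x).1]
    cases h : roundUpStep l ([], s) x
    simp [List.append_assoc]

-- the loop only reads indices it is given, so a last element past them is invisible
theorem roundUpStep_congr (t : List Char) (c : Char) (xs : List Nat)
    (h : ∀ i ∈ xs, i < t.length) (s : List Char × Nat × Bool) :
    xs.foldl (roundUpStep (t ++ [c])) s = xs.foldl (roundUpStep t) s := by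
  induction xs generalizing s with
  | nil => rfl
  | cons x xs ih =>
    have hx : x < t.length := h x (by simp)
    have hstep : roundUpStep (t ++ [c]) s x = roundUpStep t s x := by
      simp only [roundUpStep, List.getD_append _ _ _ _ hx]
    rw [List.foldl_cons, List.foldl_cons, hstep, ih (fun i hi => h i (by simp [hi]))]

-- lastIndexCopied never exceeds its initial bound
theorem roundUpStep_bound (l : List Char) (xs : List Nat) (n : Nat)
    (h : ∀ i ∈ xs, i ≤ n) (s : List Char × Nat × Bool) (hs : s.2.1 ≤ n) :
    (xs.foldl (roundUpStep l) s).2.1 ≤ n := by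
  induction xs generalizing s with
  | nil => exact hs
  | cons x xs ih =>
    rw [List.foldl_cons]
    refine ih (fun i hi => h i (by simp [hi])) _ ?_
    have hx : x ≤ n := h x (by simp)
    simp only [roundUpStep]
    split_ifs <;> simp [hs, hx]

theorem roundUpA_snoc_zero (t : List Char) : roundUpA (t ++ ['0']) = t ++ ['1'] := by
  unfold roundUpA
  have hlen : (t ++ ['0']).length = t.length + 1 := by simp
  rw [hlen, List.range_succ, List.reverse_append, List.reverse_singleton, List.singleton_append,
    List.foldl_cons]
  have hget : (t ++ ['0']).getD t.length ' ' = '0' := by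
    simp [List.getD_eq_getElem?_getD]
  have hstep : roundUpStep (t ++ ['0']) ([], (t.length + 1, false)) t.length
      = (['1'], (t.length, true)) := by
    simp [roundUpStep]

  rw [hstep, roundUpStep_broke]
  simp [roundUpAFin]

theorem roundUpA_snoc_one (t : List Char) : roundUpA (t ++ ['1']) = roundUpA t ++ ['0'] := by
  unfold roundUpA
  have hlen : (t ++ ['1']).length = t.length + 1 := by simp
  rw [hlen, List.range_succ, List.reverse_append, List.reverse_singleton, List.singleton_append,
    List.foldl_cons]
  have hget : (t ++ ['1']).getD t.length ' ' = '1' := by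
    simp [List.getD_eq_getElem?_getD]
  have hstep : roundUpStep (t ++ ['1']) ([], (t.length + 1, false)) t.length
      = (['0'], (t.length, false)) := by
    simp [roundUpStep]
  rw [hstep, roundUpStep_congr t '1' _ (by intro i hi; simp at hi; omega),
    roundUpStep_acc]
  have hb : ((List.range t.length).reverse.foldl (roundUpStep t) ([], (t.length, false))).2.1
      ≤ t.length :=
    roundUpStep_bound t _ t.length (by intro i hi; simp at hi; omega) _ (by simp)
  simp only [roundUpAFin, List.take_append_of_le_length hb, List.singleton_append]
  simp [List.append_assoc]

theorem binVal_snoc (t : List Char) (c : Char) :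
    binVal (t ++ [c]) = 2 * binVal t + (if c = '1' then 1 else 0) := by
  simp [binVal, List.foldl_append]

theorem binVal_lt (l : List Char) : binVal l < 2 ^ l.length := by
  induction l using List.reverseRecOn with
  | nil => simp [binVal]
  | append_singleton t c ih =>
    rw [binVal_snoc]
    have : (if c = '1' then 1 else 0) ≤ 1 := by split_ifs <;> omega
    simp only [List.length_append, List.length_singleton, pow_succ]
    omega

-- round-trip: format(int(t,2), '0Lb') = t for a binary string t of length L
theorem binStr_binVal (t : List Char) (hb : ∀ c ∈ t, c = '0' ∨ c = '1') :
    binStr t.length (binVal t) = t := by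
  induction t using List.reverseRecOn with
  | nil => simp [binStr, binVal]
  | append_singleton t c ih =>
    have hc : c = '0' ∨ c = '1' := hb c (by simp)
    have hbt : ∀ x ∈ t, x = '0' ∨ x = '1' := fun x hx => hb x (by simp [hx])
    rw [binVal_snoc]
    simp only [List.length_append, List.length_singleton]
    rw [binStr]
    rcases hc with h | h <;> subst h
    · have hif : (if ('0':Char) = '1' then 1 else 0) = 0 := by decide
      rw [hif]
      have h2 : (2 * binVal t + 0) / 2 = binVal t := by omega
      have h3 : (2 * binVal t + 0) % 2 = 0 := by omega
      rw [h2, h3, ih hbt]; simp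
    · have hif : (if ('1':Char) = '1' then 1 else 0) = 1 := by decide
      rw [hif]
      have h2 : (2 * binVal t + 1) / 2 = binVal t := by omega
      have h3 : (2 * binVal t + 1) % 2 = 1 := by omega
      rw [h2, h3, ih hbt]; simp

-- A's carry scan IS the width-k wrap-around increment, for binary input
theorem roundUp_arith (l : List Char) (hb : ∀ c ∈ l, c = '0' ∨ c = '1') :
    roundUpA l = binStr l.length ((binVal l + 1) % 2 ^ l.length) := by
  induction l using List.reverseRecOn with
  | nil => rfl
  | append_singleton t c ih =>
    have hc : c = '0' ∨ c = '1' := hb c (by simp)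
    have hbt : ∀ x ∈ t, x = '0' ∨ x = '1' := fun x hx => hb x (by simp [hx])
    rcases hc with h | h <;> subst h
    · -- last bit 0: increment just sets it, no carry, no overflow
      rw [roundUpA_snoc_zero, binVal_snoc]
      simp only [List.length_append, List.length_singleton]
      have hif : (if ('0':Char) = '1' then 1 else 0) = 0 := by decide
      rw [hif]
      have hv := binVal_lt t
      have hlt : 2 * binVal t + 0 + 1 < 2 ^ (t.length + 1) := by
        rw [pow_succ]; omega
      rw [Nat.mod_eq_of_lt hlt, binStr]
      have h2 : (2 * binVal t + 0 + 1) / 2 = binVal t := by omega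
      have h3 : (2 * binVal t + 0 + 1) % 2 = 1 := by omega
      rw [h2, h3, binStr_binVal t hbt]; simp
    · -- last bit 1: it becomes 0 and the carry moves into the prefix
      rw [roundUpA_snoc_one, binVal_snoc, ih hbt]
      simp only [List.length_append, List.length_singleton]
      simp only [if_true]
      have heq : (2 * binVal t + 1 + 1) % 2 ^ (t.length + 1)
          = 2 * ((binVal t + 1) % 2 ^ t.length) := by
        have : 2 * binVal t + 1 + 1 = 2 * (binVal t + 1) := by omega
        rw [this, pow_succ, mul_comm (2 ^ t.length) 2, Nat.mul_mod_mul_left]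
      rw [heq, binStr]
      have h2 : 2 * ((binVal t + 1) % 2 ^ t.length) / 2 = (binVal t + 1) % 2 ^ t.length := by omega
      have h3 : 2 * ((binVal t + 1) % 2 ^ t.length) % 2 = 0 := by omega
      rw [h2, h3]; simp

-- both negative-index slices of A agree with B's max-based slices when fl < len
theorem clampIdx_shift (n : Nat) (fl : Int) (h : fl < (n : Int)) :
    PySem.List.clampIdx n (fl - n) = PySem.List.clampIdx n (max fl 0) := by
  simp [PySem.List.clampIdx]
  split_ifs <;> omega

theorem slice_none_some (xs : List Char) (b : Int) :
    PySem.List.slice xs none (some b) = xs.take (PySem.List.clampIdx xs.length b) := by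
  simp [PySem.List.slice]

-- the two guards agree
theorem guard_iff (c : Char) (s : List Char) :
    (c = '1' ∧ PySem.Chars.find s ['1'] ≠ -1) ↔ (c = '1' ∧ PySem.Chars.isIn ['1'] s = true) := by
  rw [PySem.Chars.find_ne_neg_one_iff, PySem.Chars.isIn_iff_infix]

-- ===== VERDICT =====
theorem handleFractionLength_spec : Claim_unchanged_handleFractionLength := by
  intro mantissa fl hdom hpre hnd
  show handleFractionLength mantissa fl = handleFractionLength_alt mantissa fl
  unfold handleFractionLength handleFractionLength_alt
  simp only []
  by_cases hgt : fl > (mantissa.toList.length : Int)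
  · rw [if_pos hgt, if_pos (le_of_lt hgt)]
    rw [padFold_eq]
  · by_cases heq : fl = (mantissa.toList.length : Int)
    · exfalso
      by_cases hm : mantissa = ""
      · rcases hpre.1 with h | h
        · exact h hm
        · subst hm; simp at heq; omega
      · exact hnd ⟨heq, hm⟩
    · have hlt : fl < (mantissa.toList.length : Int) := by omega
      rw [if_neg hgt, if_neg (by omega)]
      simp only [PySem.List.slice_some_none, slice_none_some]
      rw [clampIdx_shift _ _ hlt]
      cases hp : PySem.List.pyGet? (mantissa.toList.drop (PySem.List.clampIdx mantissa.toList.length (max fl 0))) 0 with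
      | none => rfl
      | some c =>
        simp only []
        by_cases hc : c = '1' ∧ PySem.Chars.find ((mantissa.toList.drop (PySem.List.clampIdx mantissa.toList.length (max fl 0))).drop (PySem.List.clampIdx (mantissa.toList.drop (PySem.List.clampIdx mantissa.toList.length (max fl 0))).length 1)) ['1'] ≠ -1
        · rw [if_pos hc, if_pos ((guard_iff _ _).mp hc)]
          set kn := PySem.List.clampIdx mantissa.toList.length (max fl 0) with hkn
          have hclamp : kn = (max fl 0).toNat := by
            rw [hkn, PySem.List.clampIdx]
            split_ifs with h1 h2 <;> omega
          have hkle : kn ≤ mantissa.toList.length := by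
            rw [hclamp]; omega
          have hlenkeep : (mantissa.toList.take kn).length = kn := by
            rw [List.length_take]; omega
          have hbkeep : ∀ x ∈ mantissa.toList.take kn, x = '0' ∨ x = '1' := by
            by_cases hfl0 : 0 < fl
            · have hk : kn = fl.toNat := by omega
              have hp0 : (mantissa.toList.drop kn)[0]? = some c := by
                rw [← PySem.List.pyGet?_zero]; exact hp
              obtain ⟨h0, -⟩ := List.getElem?_eq_some_iff.mp hp0
              have hget : mantissa.toList.getD kn ' ' = '1' := by
                rw [List.getElem?_drop] at hp0
                rw [List.getD_eq_getElem?_getD]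
                simp only [Nat.add_zero] at hp0
                rw [hp0]
                exact hc.1
              have hclamp1 : PySem.List.clampIdx (mantissa.toList.drop kn).length 1 = 1 := by
                simp only [PySem.List.clampIdx]
                split_ifs <;> omega
              have hmem : '1' ∈ mantissa.toList.drop (kn + 1) := by
                have h2 := hc.2
                rw [hclamp1, PySem.Chars.find_ne_neg_one_iff,
                  List.singleton_infix_iff, List.drop_drop] at h2
                exact h2
              have h := hpre.2 hfl0 hlt (hk ▸ hget) (hk ▸ hmem)
              simp only [List.all_eq_true, Bool.or_eq_true, beq_iff_eq] at h
              rw [hk]; exact h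
            · have hk : kn = 0 := by omega
              simp [hk]
          rw [roundUp_arith _ hbkeep, hlenkeep]
          by_cases hk0 : (max fl 0) = 0
          · rw [if_pos hk0]
            have h0 : kn = 0 := by omega
            rw [h0]; rfl
          · rw [if_neg hk0]
            have : (max fl 0).toNat = kn := hclamp.symm
            rw [this]
        · rw [if_neg hc, if_neg (fun h => hc ((guard_iff _ _).mpr h))]

set_option maxRecDepth 100000 in
theorem handleFractionLength_changed : Claim_changed_handleFractionLength := by
  unfold Claim_changed_handleFractionLength; decide

theorem handleFractionLength_tight : Claim_exact_handleFractionLength := by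
  intro mantissa fl hdom hpre hd
  obtain ⟨hfl, hm⟩ := hd
  subst hfl
  have hlist : mantissa.toList ≠ [] := fun h => hm (by
    have := congrArg String.ofList h
    simpa using this)
  intro heq
  rw [handleFractionLength, handleFractionLength_alt] at heq
  simp only [lt_irrefl, ge_iff_le, le_refl, if_pos, sub_self,
    Int.toNat_zero, List.replicate_zero, List.append_nil] at heq
  rw [PySem.List.slice_some_none, slice_none_some] at heq
  have hclamp : PySem.List.clampIdx mantissa.toList.length 0 = 0 := by
    simp [PySem.List.clampIdx]
  rw [hclamp] at heq
  simp only [List.drop_zero, List.take_zero] at heq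
  cases hl : mantissa.toList with
  | nil => exact hlist hl
  | cons c t =>
    rw [hl] at heq
    have hget : PySem.List.pyGet? (c :: t) 0 = some c := by
      simp [PySem.List.pyGet?, PySem.List.pyIdx?]
    rw [hget] at heq
    simp only [] at heq
    have hempty : ("" : String) = String.ofList (c :: t) := by
      by_cases hcond : c = '1' ∧ PySem.Chars.find (PySem.List.slice (c :: t) (some 1) none) ['1'] ≠ -1
      · rw [if_pos hcond] at heq; exact heq
      · rw [if_neg hcond] at heq; exact heq
    have := congrArg String.toList hempty
    simp [String.toList_ofList] at this
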